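-- pv_equiv track=rewrite | github.com/wen001122/pointpoint | point.py | morton3D
-- ===== SOURCE A (Python) =====
-- def morton3D(x, y, z, depth):
--     x = x & ((1 << depth) - 1)
--     y = y & ((1 << depth) - 1)
--     z = z & ((1 << depth) - 1)
--     answer = 0
--     for i in range(depth):
--         answer |= ((x >> i) & 1) << (3 * i + 0)
--         answer |= ((y >> i) & 1) << (3 * i + 1)
--         answer |= ((z >> i) & 1) << (3 * i + 2)
--     return answer
-- ===== SOURCE B (Python) =====
-- def morton3D(x, y, z, depth):
--     # Divide-and-conquer bit spreading: the low w bits of n are interleave-spread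
--     # (bit i -> bit 3*i) by splitting the width in half, spreading each half, and
--     # recombining with one shift, instead of a per-bit loop over all depth positions.
--     def spread(n, w):
--         if w == 0:
--             return 0
--         if w == 1:
--             return n & 1
--         h = w >> 1
--         return spread(n % (1 << h), h) | spread(n >> h, w - h) << (3 * h)
--
--     return spread(x, depth) | spread(y, depth) << 1 | spread(z, depth) << 2
-- ===== Notes on version B (the rewrite author's own statement) =====
-- stated objective: alternative
-- what changed: B replaces A's per-bit loop over all depth positions by a divide-and-conquer spread: each coordinate's low depth bits are interleaved by halving the bit width, spreading both halves recursively and recombining with a single shift-or, then the three spread words are ORed together.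
import Mathlib
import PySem

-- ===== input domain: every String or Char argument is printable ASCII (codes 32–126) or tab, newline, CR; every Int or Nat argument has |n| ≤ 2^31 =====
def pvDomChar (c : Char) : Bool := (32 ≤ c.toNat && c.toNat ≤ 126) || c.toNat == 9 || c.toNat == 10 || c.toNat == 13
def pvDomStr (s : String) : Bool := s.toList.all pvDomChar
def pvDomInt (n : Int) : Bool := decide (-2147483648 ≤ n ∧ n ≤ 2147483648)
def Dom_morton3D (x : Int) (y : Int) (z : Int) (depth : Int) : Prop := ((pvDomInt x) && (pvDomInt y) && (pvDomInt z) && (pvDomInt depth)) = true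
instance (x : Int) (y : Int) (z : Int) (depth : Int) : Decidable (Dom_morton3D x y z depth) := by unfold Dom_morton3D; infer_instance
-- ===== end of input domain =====

-- B replaces A's per-bit loop over all depth positions by a divide-and-conquer spread
-- (halve the bit width, spread both halves, recombine with one shift-or)
-- (objective: alternative).

-- ===== PORT A =====
def morton3D (x : Int) (y : Int) (z : Int) (depth : Int) : Int :=
  let x := PySem.Int.band x ((1 <<< depth.toNat) - 1)
  let y := PySem.Int.band y ((1 <<< depth.toNat) - 1)
  let z := PySem.Int.band z ((1 <<< depth.toNat) - 1)
  (List.range depth.toNat).foldl (fun (answer : Int) (i : Nat) =>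
    let answer := PySem.Int.bor answer (PySem.Int.band (x >>> i) 1 <<< (3 * i + 0))
    let answer := PySem.Int.bor answer (PySem.Int.band (y >>> i) 1 <<< (3 * i + 1))
    PySem.Int.bor answer (PySem.Int.band (z >>> i) 1 <<< (3 * i + 2))) 0

-- ===== PORT B =====
-- Source B's `spread(n, w)`: divide and conquer on the bit width w (w ≥ 0, so Nat)
def pvSpreadI (n : Int) (w : Nat) : Int :=
  if w = 0 then 0
  else if w = 1 then PySem.Int.band n 1
  else
    PySem.Int.bor (pvSpreadI (PySem.Int.mod n (1 <<< (w >>> 1))) (w >>> 1))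
      (pvSpreadI (n >>> (w >>> 1)) (w - (w >>> 1)) <<< (3 * (w >>> 1)))
termination_by w
decreasing_by all_goals (simp only [Nat.shiftRight_one]; omega)

def morton3D_alt (x : Int) (y : Int) (z : Int) (depth : Int) : Int :=
  PySem.Int.bor
    (PySem.Int.bor (pvSpreadI x depth.toNat) (pvSpreadI y depth.toNat <<< (1 : Nat)))
    (pvSpreadI z depth.toNat <<< (2 : Nat))

-- ===== PRECONDITION & SPEC =====
-- Pre_ excludes depth < 0, on which both Pythons raise ValueError ('negative shift count').
def Pre_morton3D (x : Int) (y : Int) (z : Int) (depth : Int) : Prop := 0 ≤ depth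
instance (x : Int) (y : Int) (z : Int) (depth : Int) : Decidable (Pre_morton3D x y z depth) := by unfold Pre_morton3D; infer_instance
def pvWitness_morton3D : Int × Int × Int × Int := (3, 5, 6, 4)

def Spec_morton3D (x : Int) (y : Int) (z : Int) (depth : Int) (out : Int) : Prop := out = morton3D_alt x y z depth
instance (x : Int) (y : Int) (z : Int) (depth : Int) (out : Int) : Decidable (Spec_morton3D x y z depth out) := by unfold Spec_morton3D; infer_instance

-- ===== CLAIM (what is proved, stated in full; the proofs are below) =====
def Claim_equal_morton3D : Prop := ∀ (x : Int) (y : Int) (z : Int) (depth : Int), Dom_morton3D x y z depth → Pre_morton3D x y z depth → Spec_morton3D x y z depth (morton3D x y z depth)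

-- ===== LEMMAS AND PROOFS =====

-- Nat mirror of A's loop, peeling the last index (range (d+1) = range d ++ [d]).
def pvLoopN (a b c : Nat) : Nat → Nat
  | 0 => 0
  | d + 1 => ((pvLoopN a b c d ||| (((a >>> d) &&& 1) <<< (3 * d + 0)))
      ||| (((b >>> d) &&& 1) <<< (3 * d + 1)))
      ||| (((c >>> d) &&& 1) <<< (3 * d + 2))

-- Nat mirror of Source B's spread
def pvSpreadN (m : Nat) (w : Nat) : Nat :=
  if w = 0 then 0
  else if w = 1 then m &&& 1
  else
    pvSpreadN (m % 2 ^ (w / 2)) (w / 2) |||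
      pvSpreadN (m >>> (w / 2)) (w - w / 2) <<< (3 * (w / 2))
termination_by w
decreasing_by all_goals omega

theorem pvMaskNat (d : Nat) : ((1 <<< d : Nat) : Int) - 1 = ((2 ^ d - 1 : Nat) : Int) := by
  push_cast [Nat.one_shiftLeft, Nat.one_le_two_pow]
  ring

-- Python's (-k) % p (p > 0) as a Nat
theorem pvNegMod (k p : Nat) (hk : 1 ≤ k) (hp : 0 < p) :
    (-(k : Int)) % (p : Int) = ((p - 1 - (k - 1) % p : Nat) : Int) := by
  have hdm := Nat.div_add_mod (k - 1) p
  have hslt := Nat.mod_lt (k - 1) hp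
  obtain ⟨t, ht⟩ : ∃ t, (k - 1) / p = t := ⟨_, rfl⟩
  obtain ⟨s, hs⟩ : ∃ s, (k - 1) % p = s := ⟨_, rfl⟩
  obtain ⟨u, hu⟩ : ∃ u, p * t = u := ⟨_, rfl⟩
  rw [ht, hs, hu] at hdm
  rw [hs] at hslt ⊢
  have h2 : (p : Int) * (-(t : Int) - 1) = -((u : Nat) : Int) - (p : Int) := by
    rw [← hu]; push_cast; ring
  have key : -(k : Int) = ((p - 1 - s : Nat) : Int) + (p : Int) * (-(t : Int) - 1) := by
    rw [h2]; omega
  rw [key, Int.add_mul_emod_self_left]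
  exact Int.emod_eq_of_lt (Int.natCast_nonneg _) (by exact_mod_cast (by omega : p - 1 - s < p))

-- Python band with an all-ones mask is emod
theorem pvBandMask (x : Int) (d : Nat) :
    PySem.Int.band x (((1 <<< d : Nat) : Int) - 1) = x % ((2 ^ d : Nat) : Int) := by
  rw [pvMaskNat]
  by_cases hx : 0 ≤ x
  · obtain ⟨m, rfl⟩ := Int.eq_ofNat_of_zero_le hx
    rw [PySem.Int.band_natCast, Nat.and_two_pow_sub_one_eq_mod]
    push_cast
    rfl
  · have hM : (0:Int) ≤ ((2 ^ d - 1 : Nat) : Int) := Int.natCast_nonneg _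
    simp only [PySem.Int.band, if_neg hx, if_pos hM]
    have hk1 : 1 ≤ (-x).toNat := by omega
    have hxx : x = -(((-x).toNat : Nat) : Int) := by omega
    have ht : (-x - 1).toNat = (-x).toNat - 1 := by omega
    rw [Int.toNat_natCast, ht]
    conv_rhs => rw [hxx]
    rw [pvNegMod _ _ hk1 (Nat.two_pow_pos d)]
    congr 1
    rw [Nat.and_comm, Nat.and_two_pow_sub_one_eq_mod]

-- (n / a) % b = (n % (a*b)) / a  (euclidean, positive divisors)
theorem pvDivMod (n a b : Int) (ha : 0 < a) (hb : 0 < b) :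
    (n / a) % b = (n % (a * b)) / a := by
  have hab : 0 < a * b := mul_pos ha hb
  have hr0 : 0 ≤ n % (a * b) := Int.emod_nonneg n (ne_of_gt hab)
  have hrlt : n % (a * b) < a * b := Int.emod_lt_of_pos n hab
  have h2 : n = n % (a * b) + a * (b * (n / (a * b))) := by
    have h3 := Int.ediv_add_emod n (a * b)
    have hring : a * (b * (n / (a * b))) = a * b * (n / (a * b)) := by ring
    linarith
  conv_lhs => rw [h2]
  rw [Int.add_mul_ediv_left _ _ (ne_of_gt ha), Int.add_mul_emod_self_left]
  have h4 : 0 ≤ n % (a * b) / a := Int.ediv_nonneg hr0 (le_of_lt ha)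
  have h5 : n % (a * b) / a < b := by
    rw [Int.ediv_lt_iff_lt_mul ha]
    linarith
  exact Int.emod_eq_of_lt h4 h5

-- A's Int fold equals the Nat mirror
theorem pvA_loop (d : Nat) (a b c : Nat) :
    (List.range d).foldl (fun (answer : Int) (i : Nat) =>
      let answer := PySem.Int.bor answer (PySem.Int.band ((a : Int) >>> i) 1 <<< (3 * i + 0))
      let answer := PySem.Int.bor answer (PySem.Int.band ((b : Int) >>> i) 1 <<< (3 * i + 1))
      PySem.Int.bor answer (PySem.Int.band ((c : Int) >>> i) 1 <<< (3 * i + 2))) 0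
    = ((pvLoopN a b c d : Nat) : Int) := by
  induction d with
  | zero => simp [pvLoopN]
  | succ d ih =>
    rw [List.range_succ, List.foldl_append, ih]
    simp only [List.foldl_cons, List.foldl_nil, pvLoopN]
    have bandOne : ∀ m : Nat, PySem.Int.band (↑m) 1 = ((m &&& 1 : Nat) : Int) := fun m => by
      rw [show (1:Int) = ((1:Nat):Int) from rfl, PySem.Int.band_natCast]
    simp only [← Int.natCast_shiftRight, bandOne, ← Int.natCast_shiftLeft, PySem.Int.bor_natCast]

-- bit characterisation of pvLoopN
theorem pvLoopN_testBit (a b c d j : Nat) :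
    (pvLoopN a b c d).testBit j =
      (decide (j < 3 * d) &&
        (if j % 3 = 0 then a.testBit (j / 3)
         else if j % 3 = 1 then b.testBit (j / 3)
         else c.testBit (j / 3))) := by
  induction d with
  | zero => simp [pvLoopN]
  | succ d ih =>
    have hb1 : ∀ (m k : Nat), (m &&& 1).testBit k = (decide (k = 0) && m.testBit 0) := by
      intro m k
      rw [Nat.and_one_is_mod, show (2:Nat) = 2^1 from rfl, Nat.testBit_mod_two_pow]
      cases k with
      | zero => simp
      | succ k => simp [show ¬ (k+1 < 1) by omega]
    simp only [pvLoopN, Nat.testBit_or, Nat.testBit_shiftLeft, hb1, Nat.testBit_shiftRight, ih]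
    by_cases h0 : j < 3 * d
    · simp [h0, show j < 3*(d+1) by omega,
        show ¬ (3*d+1 ≤ j) by omega, show ¬ (3*d+2 ≤ j) by omega, show ¬ (3*d ≤ j) by omega]
    · by_cases h1 : j = 3 * d
      · simp [h1, show (3*d) % 3 = 0 by omega, show (3*d)/3 = d by omega,
          show ¬ (3*d+1 ≤ 3*d) by omega, show ¬ (3*d+2 ≤ 3*d) by omega, show 3*d < 3*(d+1) by omega]
      · by_cases h2 : j = 3 * d + 1
        · simp [h2, show (3*d+1) % 3 = 1 by omega, show (3*d+1)/3 = d by omega,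
            show ¬ (3*d+2 ≤ 3*d+1) by omega, show 3*d+1 < 3*(d+1) by omega,
            show 3*d ≤ 3*d+1 by omega, show ¬ (3*d+1 < 3*d) by omega]
        · by_cases h3 : j = 3 * d + 2
          · simp [h3, show (3*d+2) % 3 = 2 by omega, show (3*d+2)/3 = d by omega,
              show 3*d+2 < 3*(d+1) by omega, show 3*d ≤ 3*d+2 by omega,
              show ¬ (3*d+2 < 3*d) by omega]
          · simp [show ¬ (j < 3*(d+1)) by omega, h0,
              show 3*d ≤ j by omega, show 3*d+1 ≤ j by omega, show 3*d+2 ≤ j by omega,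
              show ¬ (j - (3*d) = 0) by omega, show ¬ (j - (3*d+1) = 0) by omega,
              show ¬ (j - (3*d+2) = 0) by omega]

-- bit characterisation of pvSpreadN
theorem pvSpreadN_testBit (m w j : Nat) :
    (pvSpreadN m w).testBit j =
      (decide (j % 3 = 0) && decide (j / 3 < w) && m.testBit (j / 3)) := by
  induction w using Nat.strong_induction_on generalizing m j with
  | _ w ih =>
    rw [pvSpreadN]
    by_cases h0 : w = 0
    · simp [h0]
    · by_cases h1 : w = 1
      · subst h1
        rw [if_neg h0, if_pos rfl]
        rw [Nat.and_one_is_mod, show (2:Nat) = 2^1 from rfl, Nat.testBit_mod_two_pow]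
        by_cases hj : j = 0
        · simp [hj]
        · have hd : ¬(j % 3 = 0) ∨ ¬(j / 3 < 1) := by omega
          rcases hd with h|h <;> simp [show ¬ j < 1 by omega, h]
      · rw [if_neg h0, if_neg h1]
        rw [Nat.testBit_or, Nat.testBit_shiftLeft]
        rw [ih (w / 2) (by omega), ih (w - w / 2) (by omega)]
        rw [Nat.testBit_mod_two_pow, Nat.testBit_shiftRight]
        by_cases hm3 : j % 3 = 0
        · by_cases hjh : j / 3 < w / 2
          · simp [hm3, hjh, show ¬ 3 * (w / 2) ≤ j by omega, show j / 3 < w by omega]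
          · have e0 : 3 * (w / 2) ≤ j := by omega
            have e2 : (j - 3 * (w / 2)) % 3 = 0 := by omega
            have e3 : (j - 3 * (w / 2)) / 3 = j / 3 - w / 2 := by omega
            have e5 : w / 2 + (j / 3 - w / 2) = j / 3 := by omega
            by_cases hjw : j / 3 < w
            · have e4 : j / 3 - w / 2 < w - w / 2 := by omega
              simp [hm3, hjh, hjw, e0, e2, e3, e4, e5]
            · have e4 : ¬ (j / 3 - w / 2 < w - w / 2) := by omega
              simp [hm3, hjh, hjw, e0, e2, e3, e4]
        · by_cases e0 : 3 * (w / 2) ≤ j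
          · have e2 : ¬ ((j - 3 * (w / 2)) % 3 = 0) := by omega
            simp [hm3, e2]
          · simp [hm3, e0]

-- Source B's Int spread equals the Nat mirror on the reduced dividend
theorem pvSpreadI_eq (n : Int) (w : Nat) :
    pvSpreadI n w = ((pvSpreadN (n % ((2 ^ w : Nat) : Int)).toNat w : Nat) : Int) := by
  fun_induction pvSpreadI n w
  · rename_i n
    simp [pvSpreadN]
  · rename_i n h0
    rw [PySem.Int.band_one, PySem.Int.mod_eq_emod_of_pos (by norm_num : (0:Int) < 2)]
    simp only [pow_one, Nat.cast_ofNat]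
    have hnn : (0:Int) ≤ n % 2 := Int.emod_nonneg n (by norm_num)
    have hlt : (n % 2).toNat < 2 := by
      have := Int.emod_lt_of_pos n (show (0:Int) < 2 by norm_num)
      omega
    rw [pvSpreadN, if_neg (by norm_num : ¬ (1:Nat) = 0), if_pos rfl]
    rw [Nat.and_one_is_mod, Nat.mod_eq_of_lt hlt]
    exact (Int.toNat_of_nonneg hnn).symm
  · rename_i n w h0 h1 ih1 ih2
    simp only [Nat.shiftRight_one] at ih1 ih2 ⊢
    have hcast : ((1 <<< (w / 2) : Nat) : Int) = ((2 ^ (w / 2) : Nat) : Int) := by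
      norm_num [Nat.one_shiftLeft]
    have hpos : (0:Int) < ((2 ^ (w / 2) : Nat) : Int) := by exact_mod_cast Nat.two_pow_pos _
    have hposw : (0:Int) < ((2 ^ w : Nat) : Int) := by exact_mod_cast Nat.two_pow_pos _
    have hposwh : (0:Int) < ((2 ^ (w - w / 2) : Nat) : Int) := by exact_mod_cast Nat.two_pow_pos _
    rw [hcast] at ih1 ⊢
    rw [PySem.Int.mod_eq_emod_of_pos hpos] at ih1 ⊢
    rw [Int.emod_emod_of_dvd n dvd_rfl] at ih1
    rw [Int.shiftRight_eq_div_pow] at ih2 ⊢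
    rw [ih1, ih2]
    have hnn : (0:Int) ≤ n % ((2 ^ w : Nat) : Int) := Int.emod_nonneg n (ne_of_gt hposw)
    have hdvd : ((2 ^ (w / 2) : Nat) : Int) ∣ ((2 ^ w : Nat) : Int) := by
      exact_mod_cast pow_dvd_pow 2 (by omega : w / 2 ≤ w)
    have f1 : (n % ((2 ^ (w / 2) : Nat) : Int)).toNat
        = (n % ((2 ^ w : Nat) : Int)).toNat % 2 ^ (w / 2) := by
      rw [show n % ((2 ^ (w / 2) : Nat) : Int) = (n % ((2 ^ w : Nat) : Int)) % ((2 ^ (w / 2) : Nat) : Int)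
        from (Int.emod_emod_of_dvd n hdvd).symm]
      obtain ⟨k, hk⟩ := Int.eq_ofNat_of_zero_le hnn
      rw [hk]
      norm_cast
    have f2 : ((n / ((2 ^ (w / 2) : Nat) : Int)) % ((2 ^ (w - w / 2) : Nat) : Int)).toNat
        = (n % ((2 ^ w : Nat) : Int)).toNat >>> (w / 2) := by
      rw [pvDivMod n _ _ hpos hposwh]
      rw [show ((2 ^ (w / 2) : Nat) : Int) * ((2 ^ (w - w / 2) : Nat) : Int) = ((2 ^ w : Nat) : Int) by
        push_cast
        rw [← pow_add]
        congr 1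
        omega]
      obtain ⟨k, hk⟩ := Int.eq_ofNat_of_zero_le hnn
      rw [hk, Nat.shiftRight_eq_div_pow]
      norm_cast
    rw [f1, f2]
    conv_rhs => rw [pvSpreadN, if_neg h0, if_neg h1]
    simp only [← Int.natCast_shiftLeft, PySem.Int.bor_natCast]

-- the core Nat identity: loop over all d positions = or of the three spreads
theorem pvCore (d a b c : Nat) :
    pvLoopN a b c d =
      (pvSpreadN a d ||| pvSpreadN b d <<< 1) ||| pvSpreadN c d <<< 2 := by
  apply Nat.eq_of_testBit_eq
  intro j
  rw [pvLoopN_testBit]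
  simp only [Nat.testBit_or, Nat.testBit_shiftLeft, pvSpreadN_testBit]
  by_cases h0 : j % 3 = 0
  · have e1 : ¬(1 ≤ j) ∨ ¬((j - 1) % 3 = 0) := by omega
    have e2 : ¬(2 ≤ j) ∨ ¬((j - 2) % 3 = 0) := by omega
    have e3 : (j < 3 * d) ↔ (j / 3 < d) := by omega
    rcases e1 with e1|e1 <;> rcases e2 with e2|e2 <;> simp [h0, e1, e2, e3]
  · by_cases h1 : j % 3 = 1
    · have e1 : 1 ≤ j := by omega
      have e2 : (j - 1) % 3 = 0 := by omega
      have e3 : (j - 1) / 3 = j / 3 := by omega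
      have e4 : (j < 3 * d) ↔ (j / 3 < d) := by omega
      have e5 : ¬(2 ≤ j) ∨ ¬((j - 2) % 3 = 0) := by omega
      rcases e5 with e5|e5 <;> simp [h1, e1, e2, e3, e4, e5]
    · have e1 : 2 ≤ j := by omega
      have e2 : (j - 2) % 3 = 0 := by omega
      have e3 : (j - 2) / 3 = j / 3 := by omega
      have e4 : (j < 3 * d) ↔ (j / 3 < d) := by omega
      have e5 : ¬(1 ≤ j) ∨ ¬((j - 1) % 3 = 0) := by omega
      rcases e5 with e5|e5 <;> simp [h0, h1, e1, e2, e3, e4, e5]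

-- ===== VERDICT (by name: the statement is the Claim_ definition above) =====
theorem morton3D_spec : Claim_equal_morton3D := by
  intro x y z depth _ _
  show morton3D x y z depth = morton3D_alt x y z depth
  have hA : ∀ v : Int, PySem.Int.band v (((1 <<< depth.toNat : Nat) : Int) - 1)
      = ↑((v % ((2 ^ depth.toNat : Nat) : Int)).toNat) := by
    intro v
    rw [pvBandMask]
    exact (Int.toNat_of_nonneg (Int.emod_nonneg _
      (by exact_mod_cast (Nat.two_pow_pos depth.toNat).ne'))).symm
  simp only [morton3D, morton3D_alt]
  rw [hA x, hA y, hA z, pvA_loop]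
  rw [pvSpreadI_eq x depth.toNat, pvSpreadI_eq y depth.toNat, pvSpreadI_eq z depth.toNat]
  simp only [← Int.natCast_shiftLeft, PySem.Int.bor_natCast]
  exact_mod_cast congrArg (fun n : Nat => (n : Int)) (pvCore depth.toNat _ _ _)
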